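-- pv_equiv track=rewrite | github.com/nj-io/social-hook | scripts/e2e/vcr_config.py | _scrub_headers
-- ===== SOURCE A (Python) =====
-- SENSITIVE_HEADERS = [
--     "Authorization",
--     "X-API-Key",
--     "X-Access-Token",
-- ]
--
-- def _scrub_headers(response):
--     """Remove sensitive headers from recorded responses."""
--     headers = response.get("headers", {})
--     for header in SENSITIVE_HEADERS:
--         # VCR stores headers as lists of values
--         if header in headers:
--             headers[header] = ["REDACTED"]
--         if header.lower() in headers:
--             headers[header.lower()] = ["REDACTED"]
--     return response
-- ===== SOURCE B (Python) =====
-- SENSITIVE_HEADERS = [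
--     "Authorization",
--     "X-API-Key",
--     "X-Access-Token",
-- ]
--
-- _TARGETS = {h for s in SENSITIVE_HEADERS for h in (s, s.lower())}
--
-- def _scrub_headers(response):
--     """Remove sensitive headers from recorded responses.
--
--     Rebuilds the headers mapping with a comprehension instead of mutating it
--     in place; return value is identical to the original's.
--     """
--     if "headers" not in response:
--         return response
--     scrubbed = {k: ["REDACTED"] if k in _TARGETS else v
--                 for k, v in response["headers"].items()}
--     return {**response, "headers": scrubbed}
-- ===== Notes on version B (the rewrite author's own statement) =====
-- stated objective: idiomatic
-- what changed: B rebuilds the headers mapping in one dict comprehension against a precomputed set of the six sensitive spellings and returns a rebuilt response, instead of A's in-place loop over the fixed list with two dict probes per entry; equivalence is about the return value only (A mutates response in place, B does not).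
import Mathlib
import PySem

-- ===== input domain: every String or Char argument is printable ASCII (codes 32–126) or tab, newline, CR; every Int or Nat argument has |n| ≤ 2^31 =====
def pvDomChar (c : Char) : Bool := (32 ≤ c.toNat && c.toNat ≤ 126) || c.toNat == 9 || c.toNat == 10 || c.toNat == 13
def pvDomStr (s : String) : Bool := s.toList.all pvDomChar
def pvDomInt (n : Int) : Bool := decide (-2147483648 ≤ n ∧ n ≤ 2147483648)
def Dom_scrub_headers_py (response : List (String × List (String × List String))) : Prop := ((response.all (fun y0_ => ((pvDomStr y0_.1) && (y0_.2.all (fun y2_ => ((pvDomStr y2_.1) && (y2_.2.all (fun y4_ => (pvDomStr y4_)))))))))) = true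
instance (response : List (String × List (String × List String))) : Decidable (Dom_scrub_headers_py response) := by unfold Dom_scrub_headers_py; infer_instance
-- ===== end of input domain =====

-- B rebuilds the headers mapping in one comprehension against a precomputed set of the six
-- sensitive spellings and returns a rebuilt response, instead of A's in-place loop over the
-- fixed list with two dict probes per entry (idiomatic restructuring; return-value
-- equivalence only — A mutates response in place, B does not).

-- ===== PORT A =====
def pvSensitive : List String := ["Authorization", "X-API-Key", "X-Access-Token"]

def scrub_headers_py (response : List (String × List (String × List String))) : List (String × List (String × List String)) :=
  let r : PySem.Dict String (List (String × List String)) := PySem.Dict.mk response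
  let headers : PySem.Dict String (List String) := PySem.Dict.mk (r.getD "headers" [])
  let headers := pvSensitive.foldl (fun h header =>
      let h := if h.contains header then h.insert header ["REDACTED"] else h
      if h.contains (PySem.Str.lower header) then h.insert (PySem.Str.lower header) ["REDACTED"] else h) headers
  (if r.contains "headers" then r.insert "headers" headers.items else r).items

-- ===== PORT B =====
-- the set comprehension `{h for s in SENSITIVE_HEADERS for h in (s, s.lower())}`
def pvTargets : PySem.Set String :=
  PySem.Set.ofList (pvSensitive.flatMap (fun s => [s, PySem.Str.lower s]))

def scrub_headers_py_alt (response : List (String × List (String × List String))) : List (String × List (String × List String)) :=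
  let r : PySem.Dict String (List (String × List String)) := PySem.Dict.mk response
  if r.contains "headers" then
    -- dict comprehension over the existing items; keys are unchanged
    let scrubbed := (PySem.Dict.mk (r.getD "headers" [])).items.map
      (fun p => (p.1, if pvTargets.contains p.1 then ["REDACTED"] else p.2))
    (r.insert "headers" scrubbed).items
  else
    r.items

-- ===== PRECONDITION & SPEC =====
def Spec_scrub_headers_py (response : List (String × List (String × List String))) (out : List (String × List (String × List String))) : Prop := out = scrub_headers_py_alt response
instance (response : List (String × List (String × List String))) (out : List (String × List (String × List String))) : Decidable (Spec_scrub_headers_py response out) := by unfold Spec_scrub_headers_py; infer_instance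

-- ===== CLAIM (what is proved, stated in full; the proofs are below) =====
def Claim_equal_scrub_headers_py : Prop := ∀ (response : List (String × List (String × List String))), Dom_scrub_headers_py response → Spec_scrub_headers_py response (scrub_headers_py response)

-- ===== LEMMAS AND PROOFS =====

-- A's guarded write: redact key k if present = map the replacement over all items.
theorem pv_condInsert (d : PySem.Dict String (List String)) (k : String) :
    (if d.contains k then d.insert k ["REDACTED"] else d)
      = PySem.Dict.mk (d.items.map (fun p => if p.1 = k then (p.1, ["REDACTED"]) else p)) := by
  by_cases h : d.contains k = true
  · rw [if_pos h]
    apply PySem.Dict.ext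
    rw [PySem.Dict.items_insert_of_contains d _ h]
    apply List.map_congr_left
    intro p _
    by_cases hp : p.1 = k
    · simp [hp]
    · simp [hp]
  · rw [if_neg h]
    apply PySem.Dict.ext
    have hne : ∀ p ∈ d.items, (if p.1 = k then (p.1, ["REDACTED"]) else p) = p := by
      intro p hp
      have hc : p.1 ≠ k := by
        intro e; apply h
        simp only [PySem.Dict.contains, List.any_eq_true]
        exact ⟨p, hp, by simp [e]⟩
      simp [hc]
    exact ((List.map_congr_left hne).trans (List.map_id _)).symm

-- A's loop over a key list L = one pointwise map over the items.
theorem pv_foldA (L : List String) (d : PySem.Dict String (List String)) :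
    L.foldl (fun h k => if h.contains k then h.insert k ["REDACTED"] else h) d
      = PySem.Dict.mk (d.items.map (fun p => if p.1 ∈ L then (p.1, ["REDACTED"]) else p)) := by
  induction L generalizing d with
  | nil => apply PySem.Dict.ext; simp
  | cons k L ih =>
    rw [List.foldl_cons, pv_condInsert, ih]
    apply PySem.Dict.ext
    simp only [List.map_map]
    apply List.map_congr_left
    intro p _
    by_cases hp : p.1 = k
    · subst hp; by_cases hL : p.1 ∈ L <;> simp [Function.comp, hL]
    · by_cases hL : p.1 ∈ L <;> simp [Function.comp, hp, hL]

-- the six spellings A probes, in A's order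
def pvSix : List String :=
  ["Authorization", "authorization", "X-API-Key", "x-api-key", "X-Access-Token", "x-access-token"]

theorem pv_mem_six (s : String) : s ∈ pvSix ↔ s ∈ pvTargets := by
  have h1 : pvTargets = ["Authorization", "authorization", "X-API-Key", "x-api-key",
      "X-Access-Token", "x-access-token"] := by decide
  rw [h1]
  simp only [pvSix, List.mem_cons, List.not_mem_nil]

-- A's whole loop over the headers dict produces exactly B's mapped items.
theorem pv_fold_items (hd : PySem.Dict String (List String)) :
    (pvSensitive.foldl (fun h header =>
      let h := if h.contains header then h.insert header ["REDACTED"] else h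
      if h.contains (PySem.Str.lower header) then h.insert (PySem.Str.lower header) ["REDACTED"] else h) hd).items
    = hd.items.map (fun p => (p.1, if pvTargets.contains p.1 then ["REDACTED"] else p.2)) := by
  have hA : pvSensitive.foldl (fun h header =>
      let h := if h.contains header then h.insert header ["REDACTED"] else h
      if h.contains (PySem.Str.lower header) then h.insert (PySem.Str.lower header) ["REDACTED"] else h) hd
    = pvSix.foldl (fun h k => if h.contains k then h.insert k ["REDACTED"] else h) hd := rfl
  rw [hA, pv_foldA]
  apply List.map_congr_left
  intro p _
  by_cases ht : p.1 ∈ pvTargets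
  · simp [pv_mem_six, ht]
  · simp [pv_mem_six, ht]

-- ===== VERDICT (by name: the statement is the Claim_ definition above) =====
theorem scrub_headers_py_spec : Claim_equal_scrub_headers_py := by
  intro response _
  show scrub_headers_py response = scrub_headers_py_alt response
  simp only [scrub_headers_py, scrub_headers_py_alt]
  by_cases hc : (PySem.Dict.mk response : PySem.Dict String (List (String × List String))).contains "headers" = true
  · simp only [hc, if_true, pv_fold_items]
  · simp only [Bool.not_eq_true] at hc
    simp only [hc, Bool.false_eq_true, if_false]
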